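-- pv_equiv track=rewrite | github.com/pypi-data/pypi-mirror-259 | packages/mhelper/mhelper-1.0.1.437.tar.gz/mhelper-1.0.1.437/mhelper/array_helper.py | iter_distance_range
-- ===== SOURCE A (Python) =====
-- from typing import List, Optional, Iterator, overload, Tuple, Dict, Iterable, Union, TypeVar, Callable, Sequence, Type, Collection, Reversible, Generic, Set
--
-- def iter_distance_range( min: int, max_: int, start: int ) -> Iterator[int]:
--     yield start
--     i = 1
--     while True:
--         if (start - i) >= min:
--             yield start - i
--
--         if (start + i) < max_:
--             yield start + i
--
--         if (start - i) < min and (start + i) >= max_: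
--             return
--
--         i += 1
-- ===== SOURCE B (Python) =====
-- def iter_distance_range(min, max_, start):
--     # Build both arms once, then emit them in distance order via one stable sort.
--     yield start
--     candidates = list(range(start - 1, min - 1, -1)) + list(range(start + 1, max_))
--     candidates.sort(key=lambda v: 2 * abs(v - start) - (v < start))
--     yield from candidates
-- ===== Notes on version B (the rewrite author's own statement) =====
-- stated objective: alternative
-- what changed: A's two-counter while-loop that interleaves left/right yields with a termination test is replaced by building the two arms as ranges once and emitting them with a single stable sort keyed on distance from start.
import Mathlib
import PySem

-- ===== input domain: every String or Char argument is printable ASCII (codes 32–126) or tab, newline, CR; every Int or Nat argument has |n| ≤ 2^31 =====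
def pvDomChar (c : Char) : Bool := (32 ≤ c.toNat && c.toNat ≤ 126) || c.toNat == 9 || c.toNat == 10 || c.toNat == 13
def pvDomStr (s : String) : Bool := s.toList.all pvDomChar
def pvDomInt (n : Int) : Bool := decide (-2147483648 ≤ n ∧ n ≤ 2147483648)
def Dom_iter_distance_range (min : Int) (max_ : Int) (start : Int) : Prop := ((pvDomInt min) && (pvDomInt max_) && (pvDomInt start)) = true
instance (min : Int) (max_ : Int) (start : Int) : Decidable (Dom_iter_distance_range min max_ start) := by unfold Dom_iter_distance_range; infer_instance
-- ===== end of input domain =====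

-- B replaces A's two-counter interleaved walk by building both arms as ranges once and
-- emitting them with a single stable sort in distance order (objective: alternative).

-- ===== PORT A =====
-- the 'while True' loop of A, starting at counter i
def pvLoopA (min : Int) (max_ : Int) (start : Int) (i : Int) : List Int :=
  ((if start - i ≥ min then [start - i] else []) ++
   (if start + i < max_ then [start + i] else [])) ++
  (if h : start - i < min ∧ start + i ≥ max_ then [] else pvLoopA min max_ start (i + 1))
termination_by (max (start - min) (max_ - 1 - start) + 1 - i).toNat
decreasing_by omega

def iter_distance_range (min : Int) (max_ : Int) (start : Int) : List Int :=
  start :: pvLoopA min max_ start 1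

-- ===== PORT B =====
def iter_distance_range_alt (min : Int) (max_ : Int) (start : Int) : List Int :=
  start ::
    PySem.List.sorted
      (PySem.List.pyRange (start - 1) (min - 1) (-1) ++ PySem.List.pyRange (start + 1) max_ 1)
      (fun v => 2 * |v - start| - (if v < start then 1 else 0))

-- ===== PRECONDITION & SPEC =====
def Spec_iter_distance_range (min : Int) (max_ : Int) (start : Int) (out : List Int) : Prop := out = iter_distance_range_alt min max_ start
instance (min : Int) (max_ : Int) (start : Int) (out : List Int) : Decidable (Spec_iter_distance_range min max_ start out) := by unfold Spec_iter_distance_range; infer_instance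

-- ===== CLAIM (what is proved, stated in full; the proofs are below) =====
def Claim_equal_iter_distance_range : Prop := ∀ (min : Int) (max_ : Int) (start : Int), Dom_iter_distance_range min max_ start → Spec_iter_distance_range min max_ start (iter_distance_range min max_ start)

-- ===== LEMMAS AND PROOFS =====

-- round-robin interleaving: one from the left list, one from the right, alternating
def pvInterleave : List Int → List Int → List Int
  | [], rs => rs
  | l :: ls, rs => l :: pvInterleave rs ls
termination_by ls rs => ls.length + rs.length
decreasing_by simp; omega

theorem pvInterleave_nil_right (ls : List Int) : pvInterleave ls [] = ls := by
  cases ls with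
  | nil => simp [pvInterleave]
  | cons l ls => simp [pvInterleave]

theorem pvInterleave_perm (ls rs : List Int) : (pvInterleave ls rs).Perm (ls ++ rs) := by
  induction ls, rs using pvInterleave.induct with
  | case1 rs => simp [pvInterleave]
  | case2 l ls rs ih =>
    simp only [pvInterleave, List.cons_append]
    exact (ih.trans (List.perm_append_comm)).cons l

-- B's sort key
def pvKey (start : Int) : Int → Int := fun v => 2 * |v - start| - (if v < start then 1 else 0)

-- A's loop from counter i is the interleave of the two remaining arms, which is
-- strictly increasing in B's key with all keys ≥ 2i-1
theorem pvLoopA_interleave (min max_ start : Int) (i : Int) : 1 ≤ i →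
    pvLoopA min max_ start i =
      pvInterleave (PySem.List.pyRange (start - i) (min - 1) (-1))
                   (PySem.List.pyRange (start + i) max_ 1) ∧
    (pvLoopA min max_ start i).Pairwise (fun a b => pvKey start a < pvKey start b) ∧
    (∀ x ∈ pvLoopA min max_ start i, 2 * i - 1 ≤ pvKey start x) := by
  induction i using pvLoopA.induct min max_ start with
  | _ i ih =>
  intro hi
  have kl : pvKey start (start - i) = 2 * i - 1 := by
    simp only [pvKey]
    rw [if_pos (by omega), abs_of_nonpos (by omega)]
    ring
  have kr : pvKey start (start + i) = 2 * i := by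
    simp only [pvKey]
    rw [if_neg (by omega), abs_of_nonneg (by omega)]
    ring
  by_cases h : start - i < min ∧ start + i ≥ max_
  · rw [pvLoopA, dif_pos h]
    rw [if_neg (by omega), if_neg (by omega)]
    rw [PySem.List.pyRange_one_eq_nil (by omega), PySem.List.pyRange_neg_one_eq_nil (by omega)]
    simp [pvInterleave]
  · obtain ⟨heq, hpw, hbd⟩ := ih h (by omega)
    rw [pvLoopA, dif_neg h]
    by_cases hl : min ≤ start - i
    · by_cases hr : start + i < max_
      · rw [if_pos (by omega), if_pos hr]
        rw [PySem.List.pyRange_neg_one_cons (by omega : (min - 1 : Int) < start - i)]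
        rw [PySem.List.pyRange_one_cons (by omega : (start + i : Int) < max_)]
        simp only [pvInterleave, List.cons_append, List.nil_append]
        have e1 : start - i - 1 = start - (i + 1) := by ring
        have e2 : start + i + 1 = start + (i + 1) := by ring
        rw [e1, e2, ← heq]
        refine ⟨rfl, ?_, ?_⟩
        · refine List.Pairwise.cons ?_ (List.Pairwise.cons ?_ hpw)
          · intro b hb
            simp only [List.mem_cons] at hb
            rcases hb with hb | hb
            · rw [kl, hb, kr]; omega
            · have := hbd b hb; omega
          · intro b hb
            have := hbd b hb; rw [kr]; omega
        · intro x hx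
          simp only [List.mem_cons] at hx
          rcases hx with hx | hx | hx
          · rw [hx, kl]
          · rw [hx, kr]; omega
          · have := hbd x hx; omega
      · rw [if_pos (by omega), if_neg hr]
        rw [PySem.List.pyRange_neg_one_cons (by omega : (min - 1 : Int) < start - i)]
        rw [PySem.List.pyRange_one_eq_nil (by omega)]
        simp only [pvInterleave, List.cons_append, List.nil_append]
        have e1 : start - i - 1 = start - (i + 1) := by ring
        rw [PySem.List.pyRange_one_eq_nil (by omega : (max_ : Int) ≤ start + (i + 1)),
            pvInterleave_nil_right] at heq
        rw [e1, ← heq]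
        refine ⟨rfl, ?_, ?_⟩
        · refine List.Pairwise.cons ?_ hpw
          intro b hb
          have := hbd b hb; rw [kl]; omega
        · intro x hx
          simp only [List.mem_cons] at hx
          rcases hx with hx | hx
          · rw [hx, kl]
          · have := hbd x hx; omega
    · have hr : start + i < max_ := by
        rcases not_and_or.mp h with h1 | h2 <;> omega
      rw [if_neg (by omega), if_pos hr]
      rw [PySem.List.pyRange_neg_one_eq_nil (by omega)]
      rw [PySem.List.pyRange_one_cons (by omega : (start + i : Int) < max_)]
      simp only [pvInterleave, List.nil_append, List.singleton_append]
      have e2 : start + i + 1 = start + (i + 1) := by ring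
      rw [PySem.List.pyRange_neg_one_eq_nil (by omega : start - (i + 1) ≤ min - 1)] at heq
      simp only [pvInterleave] at heq
      rw [e2, ← heq]
      refine ⟨rfl, ?_, ?_⟩
      · refine List.Pairwise.cons ?_ hpw
        intro b hb
        have := hbd b hb; rw [kr]; omega
      · intro x hx
        simp only [List.mem_cons] at hx
        rcases hx with hx | hx
        · rw [hx, kr]; omega
        · have := hbd x hx; omega

-- ===== VERDICT (by name: the statement is the Claim_ definition above) =====
theorem iter_distance_range_spec : Claim_equal_iter_distance_range := by
  intro min max_ start _
  show iter_distance_range min max_ start = iter_distance_range_alt min max_ start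
  unfold iter_distance_range iter_distance_range_alt
  congr 1
  obtain ⟨heq, hpw, _⟩ := pvLoopA_interleave min max_ start 1 le_rfl
  have hperm : (pvLoopA min max_ start 1).Perm
      (PySem.List.pyRange (start - 1) (min - 1) (-1) ++ PySem.List.pyRange (start + 1) max_ 1) := by
    rw [heq]; exact pvInterleave_perm _ _
  exact (PySem.List.sorted_eq_of_perm_of_pairwise_lt _ _ (pvKey start) hperm hpw).symm
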